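-- pv_equiv track=rewrite | github.com/sjurug/SVDB | SVDB_build_module.py | generate_format_field
-- ===== SOURCE A (Python) =====
-- def generate_format_field(sample_list,samples):
--     format=[]
--     samples=samples.split("|")
--     for sample in sample_list:
--         if sample in samples:
--             format.append("./.")
--         else:
--             format.append("0/0")
--
--     format="\t".join(format)
--     return(format)
-- ===== SOURCE B (Python) =====
-- def generate_format_field(sample_list, samples):
--     positions = {}
--     for i, name in enumerate(sample_list):
--         positions.setdefault(name, []).append(i)
--     result = ["0/0"] * len(sample_list)
--     for name in samples.split("|"):
--         for i in positions.get(name, []):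
--             result[i] = "./."
--     return "\t".join(result)
-- ===== Notes on version B (the rewrite author's own statement) =====
-- stated objective: alternative
-- what changed: Inverts the traversal: instead of testing 'sample in split-list' for each element of sample_list, B builds a name-to-positions index once, initializes the result to '0/0' and marks './.' positions while scanning the split names.
import Mathlib
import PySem

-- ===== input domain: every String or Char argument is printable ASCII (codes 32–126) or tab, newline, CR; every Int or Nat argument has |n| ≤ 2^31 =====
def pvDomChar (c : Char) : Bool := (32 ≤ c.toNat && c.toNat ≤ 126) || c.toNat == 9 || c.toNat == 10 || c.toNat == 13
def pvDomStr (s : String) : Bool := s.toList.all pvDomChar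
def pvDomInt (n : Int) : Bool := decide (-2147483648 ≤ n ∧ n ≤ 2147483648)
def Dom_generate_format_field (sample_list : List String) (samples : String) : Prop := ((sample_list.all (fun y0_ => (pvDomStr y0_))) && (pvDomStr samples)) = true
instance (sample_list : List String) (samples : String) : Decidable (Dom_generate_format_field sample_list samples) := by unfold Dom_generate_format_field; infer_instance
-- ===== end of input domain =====

-- B inverts the traversal: instead of probing 'sample in samples' per sample_list element,
-- it builds a name→positions index once and marks positions while scanning the split names (objective: alternative).

-- ===== PORT A =====
def generate_format_field (sample_list : List String) (samples : String) : String :=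
  let samplesL := (PySem.Str.split? samples "|").getD []   -- "|" ≠ "", so split? never returns none
  let format := sample_list.foldl
    (fun acc sample => if samplesL.contains sample then acc ++ ["./."] else acc ++ ["0/0"]) []
  PySem.Str.join "\t" format

-- ===== PORT B =====
-- positions = {}; for i, name in enumerate(sample_list): positions.setdefault(name, []).append(i)
def pvPositions (sample_list : List String) : PySem.Dict String (List Int) :=
  (PySem.List.enumerate sample_list).foldl
    (fun d p => d.modify p.2 [] (fun l => l ++ [p.1])) PySem.Dict.empty

def generate_format_field_alt (sample_list : List String) (samples : String) : String :=
  let positions := pvPositions sample_list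
  let result := List.replicate sample_list.length "0/0"
  let result := ((PySem.Str.split? samples "|").getD []).foldl
    (fun res name => (positions.getD name []).foldl
      (fun r i => PySem.List.pySetD r i "./.") res) result
  PySem.Str.join "\t" result

-- ===== PRECONDITION & SPEC =====
def Spec_generate_format_field (sample_list : List String) (samples : String) (out : String) : Prop := out = generate_format_field_alt sample_list samples
instance (sample_list : List String) (samples : String) (out : String) : Decidable (Spec_generate_format_field sample_list samples out) := by unfold Spec_generate_format_field; infer_instance

-- ===== CLAIM (what is proved, stated in full; the proofs are below) =====
def Claim_equal_generate_format_field : Prop := ∀ (sample_list : List String) (samples : String), Dom_generate_format_field sample_list samples → Spec_generate_format_field sample_list samples (generate_format_field sample_list samples)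

-- ===== LEMMAS AND PROOFS =====

-- A's loop builds exactly the map over sample_list
lemma pv_foldl_if_append {α β : Type} (p : α → Bool) (a b : β) (l : List α) (acc : List β) :
    l.foldl (fun acc x => if p x then acc ++ [a] else acc ++ [b]) acc
      = acc ++ l.map (fun x => if p x then a else b) := by
  have h : (fun (acc : List β) (x : α) => if p x then acc ++ [a] else acc ++ [b])
      = fun acc x => acc ++ [if p x then a else b] := by
    funext acc x; by_cases hp : p x <;> simp [hp]
  rw [h, PySem.List.foldl_append_singleton_eq_map]

-- lookup in the fold-built index
lemma pv_positions_getD (ps : List (Int × String)) (d : PySem.Dict String (List Int)) (nm : String) :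
    (ps.foldl (fun d p => d.modify p.2 [] (fun l => l ++ [p.1])) d).getD nm []
      = d.getD nm [] ++ (ps.filter (fun p => p.2 == nm)).map (·.1) := by
  induction ps generalizing d with
  | nil => simp
  | cons p ps ih =>
    simp only [List.foldl_cons, ih, List.filter_cons]
    by_cases h : p.2 = nm
    · subst h
      simp [PySem.Dict.getD_modify_self]
    · have hb : (p.2 == nm) = false := by simp [h]
      rw [PySem.Dict.getD_modify_of_ne d [] _ (fun he => h he.symm)]
      simp [hb]

-- membership in the filtered-enumerate index list
lemma pv_mem_enum_filter (xs : List String) (nm : String) (s i : Int) :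
    i ∈ ((PySem.List.enumerate xs s).filter (fun p => p.2 == nm)).map (·.1)
      ↔ ∃ k : Nat, ∃ hk : k < xs.length, xs[k] = nm ∧ i = s + k := by
  induction xs generalizing s with
  | nil => simp [PySem.List.enumerate]
  | cons x xs ih =>
    rw [PySem.List.enumerate_cons]
    by_cases h : x = nm
    · subst h
      simp only [List.filter_cons, beq_self_eq_true, if_pos, List.map_cons, List.mem_cons, ih]
      constructor
      · rintro (rfl | ⟨k, hk, hx, rfl⟩)
        · exact ⟨0, by simp, by simp⟩
        · exact ⟨k + 1, by simp only [List.length_cons]; omega, by simpa using hx, by push_cast; ring⟩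
      · rintro ⟨k, hk, hx, rfl⟩
        cases k with
        | zero => left; simp
        | succ k => right; exact ⟨k, by simp only [List.length_cons] at hk; omega, by simpa using hx, by push_cast; ring⟩
    · have hb : (x == nm) = false := by simp [h]
      simp only [List.filter_cons, hb, Bool.false_eq_true, if_neg, ih, not_false_eq_true]
      constructor
      · rintro ⟨k, hk, hx, rfl⟩
        exact ⟨k + 1, by simp only [List.length_cons]; omega, by simpa using hx, by push_cast; ring⟩
      · rintro ⟨k, hk, hx, rfl⟩
        cases k with
        | zero => exact absurd (by simpa using hx) h
        | succ k => exact ⟨k, by simp only [List.length_cons] at hk; omega, by simpa using hx, by push_cast; ring⟩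

-- the marking fold, pointwise
lemma pv_setFold_getElem? (idxs : List Int) (res : List String) (j : Nat)
    (hnn : ∀ i ∈ idxs, 0 ≤ i) :
    (idxs.foldl (fun r i => PySem.List.pySetD r i "./.") res)[j]?
      = if (j : Int) ∈ idxs ∧ j < res.length then some "./." else res[j]? := by
  induction idxs generalizing res with
  | nil => simp
  | cons i idxs ih =>
    have hi : 0 ≤ i := hnn i (by simp)
    simp only [List.foldl_cons]
    rw [PySem.List.pySetD_of_nonneg res "./." hi,
        ih _ (fun x hx => hnn x (by simp [hx]))]
    simp only [List.length_set, List.getElem?_set, List.mem_cons]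
    by_cases hji : (j : Int) = i
    · have hij : i.toNat = j := by omega
      by_cases hjl : j < res.length <;> simp_all
    · have : i.toNat ≠ j := by omega
      simp [this, hji]

-- outer fold over the split names equals the membership map
lemma pv_main (sample_list : List String) (ns : List String) :
    ns.foldl (fun res name => ((pvPositions sample_list).getD name []).foldl
        (fun r i => PySem.List.pySetD r i "./.") res)
      (List.replicate sample_list.length "0/0")
      = sample_list.map (fun s => if ns.contains s then "./." else "0/0") := by
  induction ns using List.reverseRecOn with
  | nil => simp [List.map_const']
  | append_singleton ns nm ih =>
    rw [List.foldl_append, ih, List.foldl_cons, List.foldl_nil]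
    have hpos : ∀ i : Int, i ∈ (pvPositions sample_list).getD nm []
        ↔ ∃ k : Nat, ∃ hk : k < sample_list.length, sample_list[k] = nm ∧ i = k := by
      intro i
      rw [pvPositions, pv_positions_getD]
      simpa using pv_mem_enum_filter sample_list nm 0 i
    apply List.ext_getElem?
    intro j
    rw [pv_setFold_getElem? _ _ _ (fun i hi => by
      obtain ⟨k, hk, _, rfl⟩ := (hpos i).1 hi; positivity)]
    simp only [List.length_map, List.getElem?_map]
    by_cases hj : j < sample_list.length
    · have hmem : ((j : Int) ∈ (pvPositions sample_list).getD nm []) ↔ sample_list[j] = nm := by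
        rw [hpos]
        constructor
        · rintro ⟨k, hk, hx, hjk⟩
          have : k = j := by omega
          subst this; exact hx
        · intro h; exact ⟨j, hj, h, rfl⟩
      by_cases hs : sample_list[j] = nm
      · simp [hj, hmem.2 hs, hs]
      · have hnm : ¬ ((j : Int) ∈ (pvPositions sample_list).getD nm []) := fun h => hs (hmem.1 h)
        simp only [hnm, false_and, if_neg, not_false_eq_true,
          List.getElem?_eq_getElem hj, Option.map_some]
        by_cases hin : sample_list[j] ∈ ns <;> simp [hin, hs]
    · simp [hj]

-- ===== VERDICT (by name: the statement is the Claim_ definition above) =====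
theorem generate_format_field_spec : Claim_equal_generate_format_field := by
  intro sample_list samples _
  unfold Spec_generate_format_field generate_format_field generate_format_field_alt
  dsimp only
  rw [pv_main, pv_foldl_if_append]
  simp
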